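-- pv_equiv track=rewrite | github.com/WeeYoungSeok/python_coding_study | programmers_lv_1/problem_1.py | solution
-- ===== SOURCE A (Python) =====
-- def solution(new_id):
--     answer = ''
--     # ., -, _ 포함 여부 배열
--     special = [".", "-", "_"]
--     # step 1 : 소문자로 변경
--     new_id = new_id.lower()
--     # step 2 ~ 4
--     for char in new_id:
--         if len(answer) == 0:
--             if char != "." and (char == "_" or char == "-" or char.isdigit()
--                                 or char.isalpha()):
--                 answer += char
--         else:
--             if char in special or char.isdigit() or char.isalpha():
--                 if char == "." and answer[len(answer) - 1] == ".":
--                     continue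
--                 else:
--                     answer += char
--
--     answer = answer.strip(".")
--
--     # step 5 ~ 7
--     if len(answer) >= 16:
--         answer = answer[:15]
--         if answer[len(answer) - 1] == ".":
--             answer = answer[:-1]
--     else:
--         if len(answer) == 0:
--             answer = "a"
--         if len(answer) <= 2:
--             while len(answer) < 3:
--                 answer += answer[-1]
--     return answer
-- ===== SOURCE B (Python) =====
-- def solution(new_id):
--     s = new_id.lower()
--     kept = [c for c in s if c in '.-_' or c.isdigit() or c.isalpha()]
--     # stateless pairwise pass: drop each dot whose predecessor in kept is a dot, then strip ends
--     core = ''.join(c for c, p in zip(kept, [''] + kept)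
--                    if not (c == '.' and p == '.')).strip('.')
--     if len(core) >= 16:
--         core = core[:15].removesuffix('.')
--     else:
--         core = core or 'a'
--         if len(core) < 3:
--             core = (core + core[-1] * 2)[:3]
--     return core
-- ===== Notes on version B (the rewrite author's own statement) =====
-- stated objective: idiomatic
-- what changed: A's single stateful accumulator loop (branching on whether the answer built so far is empty and peeking at its last character) is replaced by a stateless pipeline: lowercase, filter the allowed characters, a pairwise zip-with-predecessor pass that drops a dot following a dot, strip the dots at both ends, and closed-form slicing/padding (removesuffix and a take-3 of the tail-padded string) instead of the conditional chop and the while-append loop.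
import Mathlib
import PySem

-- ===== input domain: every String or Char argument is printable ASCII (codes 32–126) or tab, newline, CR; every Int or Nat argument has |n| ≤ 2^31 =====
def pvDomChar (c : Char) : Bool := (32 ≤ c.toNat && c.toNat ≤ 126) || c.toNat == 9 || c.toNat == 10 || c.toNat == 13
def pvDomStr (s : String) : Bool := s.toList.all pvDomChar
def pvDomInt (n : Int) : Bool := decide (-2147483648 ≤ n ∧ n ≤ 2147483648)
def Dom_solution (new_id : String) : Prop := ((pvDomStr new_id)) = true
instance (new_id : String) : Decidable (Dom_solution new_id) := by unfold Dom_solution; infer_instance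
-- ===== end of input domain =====

-- B replaces A's stateful accumulator loop by a stateless filter + zip-with-predecessor
-- collapse + strip pipeline with closed-form tail logic (idiomatic; same cost).


-- ===== PORT A =====
-- the loop of steps 2–4: `answer` is the accumulator, `cs` the remaining characters
def solLoopA (answer : List Char) (cs : List Char) : List Char :=
  match cs with
  | [] => answer
  | c :: rest =>
    if answer.length == 0 then
      if c != '.' && (c == '_' || c == '-' || PySem.Chars.isdigit c || PySem.Chars.isalpha c) then
        solLoopA (answer ++ [c]) rest
      else
        solLoopA answer rest
    else
      if ['.', '-', '_'].contains c || PySem.Chars.isdigit c || PySem.Chars.isalpha c then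
        if c == '.' && PySem.List.pyGet? answer ((answer.length : Int) - 1) == some '.' then
          solLoopA answer rest                       -- `continue`
        else
          solLoopA (answer ++ [c]) rest
      else
        solLoopA answer rest

-- the `while len(answer) < 3: answer += answer[-1]` loop; answer[-1] = getLastD
-- (Python would raise on an empty answer; the caller only reaches it nonempty)
def solPadA (answer : List Char) : List Char :=
  if answer.length < 3 then solPadA (answer ++ [answer.getLastD 'a']) else answer
  termination_by 3 - answer.length
  decreasing_by simp; omega

def solution (new_id : String) : String :=
  let s := PySem.Chars.lower new_id.toList
  let answer := solLoopA [] s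
  let answer := PySem.Chars.stripChars answer ['.']
  if 16 ≤ answer.length then
    let answer := PySem.List.slice answer none (some 15)
    if PySem.List.pyGet? answer ((answer.length : Int) - 1) == some '.' then
      String.ofList (PySem.List.slice answer none (some (-1)))
    else String.ofList answer
  else
    let answer := if answer.length == 0 then ['a'] else answer
    if answer.length ≤ 2 then String.ofList (solPadA answer) else String.ofList answer

-- ===== PORT B =====
-- Source B's character test `c in '.-_' or c.isdigit() or c.isalpha()`
def solAllowedB (c : Char) : Bool :=
  ['.', '-', '_'].contains c || PySem.Chars.isdigit c || PySem.Chars.isalpha c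

def solution_alt (new_id : String) : String :=
  let kept := (PySem.Chars.lower new_id.toList).filter solAllowedB
  -- zip(kept, [''] + kept): the '' sentinel (never equal to '.') is modelled as `none`
  let core := ((kept.zip (none :: kept.map some)).filter
                (fun cp => !(cp.1 == '.' && cp.2 == some '.'))).map Prod.fst
  let core := PySem.Chars.stripChars core ['.']
  if 16 ≤ core.length then
    -- core[:15].removesuffix('.')
    let t := core.take 15
    String.ofList (if t.getLast? == some '.' then t.dropLast else t)
  else
    let core := if core.isEmpty then ['a'] else core
    -- (core + core[-1]*2)[:3]
    if core.length < 3 then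
      String.ofList ((core ++ List.replicate 2 (core.getLastD 'a')).take 3)
    else String.ofList core

-- ===== PRECONDITION & SPEC =====
def Spec_solution (new_id : String) (out : String) : Prop := out = solution_alt new_id
instance (new_id : String) (out : String) : Decidable (Spec_solution new_id out) := by unfold Spec_solution; infer_instance

-- ===== CLAIM (what is proved, stated in full; the proofs are below) =====
def Claim_equal_solution : Prop := ∀ (new_id : String), Dom_solution new_id → Spec_solution new_id (solution new_id)

-- ===== LEMMAS AND PROOFS =====

-- recursive model of the zip-with-predecessor collapse pass
def solColZ (p : Option Char) (xs : List Char) : List Char :=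
  match xs with
  | [] => []
  | c :: cs => if c == '.' && p == some '.' then solColZ p cs else c :: solColZ (some c) cs

theorem solColZ_eq_zip (xs : List Char) (p : Option Char) :
    ((xs.zip (p :: xs.map some)).filter
      (fun cp => !(cp.1 == '.' && cp.2 == some '.'))).map Prod.fst = solColZ p xs := by
  induction xs generalizing p with
  | nil => rfl
  | cons c cs ih =>
    rw [List.map_cons, List.zip_cons_cons]
    by_cases h : (c == '.' && p == some '.') = true
    · simp only [Bool.and_eq_true, beq_iff_eq] at h
      obtain ⟨hc, hp⟩ := h
      subst hc; subst hp
      rw [List.filter_cons_of_neg (by simp)]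
      rw [show solColZ (some '.') ('.' :: cs) = solColZ (some '.') cs from by simp [solColZ]]
      exact ih (some '.')
    · have hb : (c == '.' && p == some '.') = false := Bool.eq_false_iff.mpr h
      rw [List.filter_cons_of_pos (by simp [hb]), List.map_cons, ih (some c)]
      conv_rhs => rw [solColZ]
      rw [if_neg h]

theorem solPyGet_last (l : List Char) (h : l ≠ []) :
    PySem.List.pyGet? l ((l.length : Int) - 1) = l.getLast? := by
  have h1 : ((l.length : Int) - 1) = ((l.length - 1 : Nat) : Int) := by
    have := List.length_pos_of_ne_nil h
    omega
  rw [h1, PySem.List.pyGet?_natCast, List.getLast?_eq_getElem?]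

theorem solDropWhile_colZ_dot (xs : List Char) :
    List.dropWhile (fun c => c == '.') (solColZ (some '.') xs)
      = List.dropWhile (fun c => c == '.') (solColZ none xs) := by
  cases xs with
  | nil => rfl
  | cons c cs =>
    by_cases h : c = '.'
    · subst h; simp [solColZ, List.dropWhile]
    · have h' : (c == '.') = false := by simpa using h
      simp [solColZ, h', List.dropWhile]

-- one unfolding step of A's loop, nonempty accumulator
theorem solLoopA_cons_ne (acc : List Char) (h : acc ≠ []) (c : Char) (rest : List Char) :
    solLoopA acc (c :: rest) =
      if solAllowedB c then
        (if c == '.' && PySem.List.pyGet? acc ((acc.length : Int) - 1) == some '.' then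
          solLoopA acc rest
        else solLoopA (acc ++ [c]) rest)
      else solLoopA acc rest := by
  have hlen : (acc.length == 0) = false := by simp [List.length_eq_zero_iff, h]
  rw [solLoopA, hlen]
  rfl

-- one unfolding step of A's loop, empty accumulator
theorem solLoopA_cons_nil (c : Char) (rest : List Char) :
    solLoopA [] (c :: rest) =
      if solAllowedB c && c != '.' then solLoopA [c] rest else solLoopA [] rest := by
  rw [solLoopA]
  have : (c != '.' && (c == '_' || c == '-' || PySem.Chars.isdigit c || PySem.Chars.isalpha c))
       = (solAllowedB c && c != '.') := by
    simp only [solAllowedB, List.contains_cons, List.contains_nil]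
    cases h1 : c == '.' <;> cases h2 : c == '_' <;> cases h3 : c == '-' <;>
      cases h4 : PySem.Chars.isdigit c <;> cases h5 : PySem.Chars.isalpha c <;>
      simp [bne, h1, h2, h3, h4, h5]
  rw [this]
  rfl

theorem solLoopA_nonempty (cs : List Char) (acc : List Char) (h : acc ≠ []) :
    solLoopA acc cs = acc ++ solColZ acc.getLast? (cs.filter solAllowedB) := by
  induction cs generalizing acc with
  | nil => simp [solLoopA, solColZ]
  | cons c rest ih =>
    rw [solLoopA_cons_ne acc h c rest, solPyGet_last acc h]
    by_cases ha : solAllowedB c = true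
    · rw [if_pos ha, List.filter_cons_of_pos ha]
      by_cases hskip : (c == '.' && acc.getLast? == some '.') = true
      · rw [if_pos hskip, ih acc h]
        have hc : c = '.' := by
          simp only [Bool.and_eq_true, beq_iff_eq] at hskip
          exact hskip.1
        conv_rhs => rw [solColZ]
        rw [if_pos (by simpa [hc] using hskip)]
      · rw [if_neg hskip, ih (acc ++ [c]) (by simp)]
        conv_rhs => rw [solColZ]
        rw [if_neg hskip, List.getLast?_concat, List.append_assoc]
        rfl
    · rw [if_neg ha, List.filter_cons_of_neg ha, ih acc h]

theorem solLoopA_empty (cs : List Char) :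
    solLoopA [] cs
      = List.dropWhile (fun c => c == '.') (solColZ none (cs.filter solAllowedB)) := by
  induction cs with
  | nil => rfl
  | cons c rest ih =>
    rw [solLoopA_cons_nil c rest]
    by_cases ha : solAllowedB c = true
    · by_cases hc : c = '.'
      · subst hc
        rw [if_neg (by simp), ih, List.filter_cons_of_pos ha]
        conv_rhs => rw [solColZ]
        rw [if_neg (by simp)]
        rw [List.dropWhile_cons_of_pos (by simp), solDropWhile_colZ_dot]
      · have hc' : (c == '.') = false := by simpa using hc
        rw [if_pos (by simp [ha, hc', hc]), solLoopA_nonempty rest [c] (by simp),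
            List.filter_cons_of_pos ha]
        conv_rhs => rw [solColZ]
        rw [if_neg (by simp [hc, hc']), List.dropWhile_cons_of_neg (by simp [hc', hc])]
        rfl
    · rw [if_neg (by simp [ha]), ih, List.filter_cons_of_neg ha]

theorem solStrip_dropWhile (x : List Char) :
    PySem.Chars.stripChars (List.dropWhile (fun c => c == '.') x) ['.']
      = PySem.Chars.stripChars x ['.'] := by
  simp only [PySem.Chars.stripChars]
  have hp : (fun c => (['.'] : List Char).contains c) = (fun c : Char => c == '.') := by
    funext c
    by_cases h : c = '.'
    · subst h; rfl
    · have h1 : (c == '.') = false := by simpa using h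
      have h2 : ('.' == c) = false := by simpa using (Ne.symm h)
      simp [List.contains_cons, h1, h2, h]
  rw [hp, List.dropWhile_idempotent]

theorem solPad_closed (l : List Char) (h : l ≠ []) (h3 : l.length < 3) :
    solPadA l = (l ++ List.replicate 2 (l.getLastD 'a')).take 3 := by
  match l with
  | [a] =>
    rw [solPadA, if_pos (by simp), solPadA, if_pos (by simp), solPadA, if_neg (by simp)]
    simp
  | [a, b] =>
    rw [solPadA, if_pos (by simp), solPadA, if_neg (by simp)]
    simp
  | [] => exact absurd rfl h
  | a :: b :: c :: rest => simp at h3; omega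

-- ===== VERDICT (by name: the statement is the Claim_ definition above) =====
theorem solution_spec : Claim_equal_solution := by
  intro new_id _
  unfold Spec_solution solution solution_alt
  dsimp only
  rw [solColZ_eq_zip, solLoopA_empty, solStrip_dropWhile]
  set core := PySem.Chars.stripChars
      (solColZ none ((PySem.Chars.lower new_id.toList).filter solAllowedB)) ['.'] with hcore
  clear_value core
  by_cases hlen : 16 ≤ core.length
  · rw [if_pos hlen, if_pos hlen]
    have hslice : PySem.List.slice core none (some 15) = core.take 15 := by
      rw [PySem.List.slice_to core (show (0:Int) ≤ 15 by norm_num)]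
      rfl
    rw [hslice]
    have hne : core.take 15 ≠ [] := by
      have h2 : (core.take 15).length = 15 := by
        rw [List.length_take]; omega
      intro hnil
      rw [hnil] at h2
      simp at h2
    rw [solPyGet_last _ hne, PySem.List.slice_to_neg_one]
    split_ifs <;> rfl
  · rw [if_neg hlen, if_neg hlen]
    have hempt : (core.length == 0) = core.isEmpty := by cases core <;> rfl
    rw [hempt]
    by_cases hz : core.isEmpty = true
    · rw [if_pos hz]
      simp only [List.length_cons, List.length_nil]
      rw [if_pos (by omega), if_pos (by omega), solPad_closed ['a'] (by simp) (by simp)]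
    · rw [if_neg hz]
      by_cases h3 : core.length < 3
      · rw [if_pos (by omega), if_pos h3,
            solPad_closed core (by simpa [List.isEmpty_iff] using hz) h3]
      · rw [if_neg (by omega), if_neg h3]
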